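-- pv_equiv track=rewrite | github.com/MC-kit/mckit-meshes | src/mckit_meshes/plot/read_plotm_file.py | _extract_description_lines
-- ===== SOURCE A (Python) =====
-- def _extract_description_lines(lines: list[str]) -> list[str]:
--     description_lines: list[str] = []
--     for line in lines:
--         if description_lines or line.startswith("     30   2205"):
--             description_lines.append(line)
--             if "extent = " in line:
--                 break
--     return description_lines
-- ===== SOURCE B (Python) =====
-- def _extract_description_lines(lines: list[str]) -> list[str]:
--     start = None
--     for i, line in enumerate(lines):
--         if line.startswith("     30   2205"):
--             start = i
--             break
--     if start is None:
--         return []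
--     tail = lines[start:]
--     for j, line in enumerate(tail):
--         if "extent = " in line:
--             return tail[:j + 1]
--     return tail
-- ===== Notes on version B (the rewrite author's own statement) =====
-- stated objective: alternative
-- what changed: Replaces the single flag-style accumulation loop (collecting while a boolean-by-nonemptiness flag is set) by two index searches and slicing: find the start index, then find the terminator inside the tail and return the corresponding slice; no accumulator list is maintained.
import Mathlib
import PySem

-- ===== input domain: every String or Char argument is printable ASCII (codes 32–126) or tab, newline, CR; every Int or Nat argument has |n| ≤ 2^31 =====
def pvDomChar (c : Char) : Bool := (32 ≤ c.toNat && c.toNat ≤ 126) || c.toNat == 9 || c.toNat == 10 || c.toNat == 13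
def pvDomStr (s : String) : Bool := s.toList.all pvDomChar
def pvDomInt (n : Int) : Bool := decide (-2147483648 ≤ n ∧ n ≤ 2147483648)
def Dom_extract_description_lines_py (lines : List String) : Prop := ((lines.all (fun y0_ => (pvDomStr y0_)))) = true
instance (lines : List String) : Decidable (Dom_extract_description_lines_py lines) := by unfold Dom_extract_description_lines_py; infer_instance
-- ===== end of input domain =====

-- B replaces A's flag-style accumulation loop by two index searches plus slicing (alternative decomposition, same cost).

-- ===== PORT A =====
-- A's for-loop with break, as structural recursion over the remaining lines with the
-- accumulator `description_lines` (appended at the end, as in Python).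
def pvLoopA (ls : List String) (acc : List String) : List String :=
  match ls with
  | [] => acc
  | l :: ls =>
    if !acc.isEmpty || PySem.Str.startswith l "     30   2205" then
      let acc' := acc ++ [l]
      if PySem.Str.isIn "extent = " l then acc' else pvLoopA ls acc'
    else pvLoopA ls acc

def extract_description_lines_py (lines : List String) : List String :=
  pvLoopA lines []

-- ===== PORT B =====
-- first loop of B: index of the first line starting with the marker (`start`)
def pvFindStart (ls : List String) : Option Nat :=
  match ls with
  | [] => none
  | l :: ls =>
    if PySem.Str.startswith l "     30   2205" then some 0
    else (pvFindStart ls).map (· + 1)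

-- second loop of B: index of the first line containing "extent = " in the tail
def pvFindEnd (ls : List String) : Option Nat :=
  match ls with
  | [] => none
  | l :: ls =>
    if PySem.Str.isIn "extent = " l then some 0
    else (pvFindEnd ls).map (· + 1)

def extract_description_lines_py_alt (lines : List String) : List String :=
  match pvFindStart lines with
  | none => []
  | some start =>
    let tail := PySem.List.slice lines (some (start : Int)) none   -- lines[start:]
    match pvFindEnd tail with
    | some j => PySem.List.slice tail none (some ((j : Int) + 1))  -- tail[:j+1]
    | none => tail

-- ===== PRECONDITION & SPEC =====
def Spec_extract_description_lines_py (lines : List String) (out : List String) : Prop := out = extract_description_lines_py_alt lines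
instance (lines : List String) (out : List String) : Decidable (Spec_extract_description_lines_py lines out) := by unfold Spec_extract_description_lines_py; infer_instance

-- ===== CLAIM (what is proved, stated in full; the proofs are below) =====
def Claim_equal_extract_description_lines_py : Prop := ∀ (lines : List String), Dom_extract_description_lines_py lines → Spec_extract_description_lines_py lines (extract_description_lines_py lines)

-- ===== LEMMAS AND PROOFS =====

-- equation lemmas for the recursive helpers
lemma pvFindEnd_cons (l : String) (ls : List String) :
    pvFindEnd (l :: ls) =
      if PySem.Str.isIn "extent = " l then some 0
      else (pvFindEnd ls).map (· + 1) := rfl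

lemma pvFindStart_cons (l : String) (ls : List String) :
    pvFindStart (l :: ls) =
      if PySem.Str.startswith l "     30   2205" then some 0
      else (pvFindStart ls).map (· + 1) := rfl

lemma pvLoopA_cons (l : String) (ls acc : List String) :
    pvLoopA (l :: ls) acc =
      if !acc.isEmpty || PySem.Str.startswith l "     30   2205" then
        (if PySem.Str.isIn "extent = " l then acc ++ [l] else pvLoopA ls (acc ++ [l]))
      else pvLoopA ls acc := rfl

-- what B returns once the start is fixed, in drop/take normal form
def pvTakeB (ls : List String) : List String :=
  match pvFindEnd ls with
  | some j => ls.take (j + 1)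
  | none => ls

lemma pvTakeB_cons (l : String) (ls : List String) :
    pvTakeB (l :: ls) =
      if PySem.Str.isIn "extent = " l then [l] else l :: pvTakeB ls := by
  unfold pvTakeB
  rw [pvFindEnd_cons]
  split_ifs with h
  · simp
  · cases hE : pvFindEnd ls <;> simp

-- alt in drop/take normal form
lemma alt_eq (lines : List String) :
    extract_description_lines_py_alt lines =
      match pvFindStart lines with
      | none => []
      | some s => pvTakeB (lines.drop s) := by
  cases hS : pvFindStart lines with
  | none => simp [extract_description_lines_py_alt, hS]
  | some s =>
    simp only [extract_description_lines_py_alt, hS]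
    rw [PySem.List.slice_from_natCast]
    cases hE : pvFindEnd (lines.drop s) with
    | some j =>
      have hc : ((j : Int) + 1) = ((j + 1 : Nat) : Int) := by push_cast; ring
      simp only [hE, hc, PySem.List.slice_to_natCast, pvTakeB]
    | none => simp [pvTakeB, hE]

-- the collecting phase of A's loop, with any nonempty accumulator
lemma loopA_collect (ls : List String) (acc : List String) (h : acc ≠ []) :
    pvLoopA ls acc = acc ++ pvTakeB ls := by
  induction ls generalizing acc with
  | nil => simp [pvLoopA, pvTakeB, pvFindEnd]
  | cons l ls ih =>
    rw [pvLoopA_cons, pvTakeB_cons]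
    have hne : (!acc.isEmpty || PySem.Str.startswith l "     30   2205") = true := by
      simp [h]
    rw [if_pos hne]
    split_ifs with hIn
    · rfl
    · rw [ih (acc ++ [l]) (by simp)]
      simp

theorem main_eq (lines : List String) :
    extract_description_lines_py lines = extract_description_lines_py_alt lines := by
  rw [alt_eq]
  unfold extract_description_lines_py
  induction lines with
  | nil => simp [pvLoopA, pvFindStart]
  | cons l ls ih =>
    rw [pvLoopA_cons, pvFindStart_cons]
    simp only [List.isEmpty_nil, Bool.not_true, Bool.false_or]
    by_cases hS : PySem.Str.startswith l "     30   2205"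
    · rw [if_pos hS, if_pos hS]
      simp only [List.drop_zero, List.nil_append]
      rw [pvTakeB_cons]
      split_ifs with hIn
      · rfl
      · rw [loopA_collect ls [l] (by simp)]
        rfl
    · rw [if_neg hS, if_neg hS, ih]
      cases hF : pvFindStart ls <;> simp

-- ===== VERDICT (by name: the statement is the Claim_ definition above) =====
theorem extract_description_lines_py_spec : Claim_equal_extract_description_lines_py := by
  intro lines _
  unfold Spec_extract_description_lines_py
  exact main_eq lines
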